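-- pv_equiv track=rewrite | github.com/korntewin/hashcode-2022 | python/methods.py | cal_score_fraction
-- ===== SOURCE A (Python) =====
-- def cal_score_fraction(xs, ing2ind_dict, cust_prefs: dict) -> int:
--     """Able to calculate fraction input
--     """
--
--     like_scores = [
--         xs[ing2ind_dict[like]]
--         for _, prefs in cust_prefs.items()
--         for like in prefs[1]
--         if like in ing2ind_dict
--     ]
--
--     dislike_scores = [
--         xs[ing2ind_dict[dislike]]
--         for _, prefs in cust_prefs.items()
--         for dislike in prefs[0]
--         if dislike in ing2ind_dict
--     ]
--
--     return sum(like_scores) - sum(dislike_scores)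
-- ===== SOURCE B (Python) =====
-- def cal_score_fraction(xs, ing2ind_dict, cust_prefs: dict) -> int:
--     """Net-count aggregation: first build a dictionary mapping each
--     ingredient to its net occurrence count (+1 per like, -1 per dislike)
--     across all customers, then return a single weighted sum
--     count * xs[index] over the distinct known ingredients."""
--     net = {}
--     for prefs in cust_prefs.values():
--         for dislike in prefs[0]:
--             net[dislike] = net.get(dislike, 0) - 1
--         for like in prefs[1]:
--             net[like] = net.get(like, 0) + 1
--     return sum(c * xs[ing2ind_dict[ing]]
--                for ing, c in net.items() if ing in ing2ind_dict)
-- ===== Notes on version B (the rewrite author's own statement) =====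
-- stated objective: alternative
-- what changed: Instead of scanning all preferences twice and summing per-occurrence scores, B aggregates a net occurrence count per ingredient (+1 like, -1 dislike) in one dictionary pass and returns one weighted sum count * xs[index] over the distinct ingredients, so each xs lookup happens once per distinct ingredient.
import Mathlib
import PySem

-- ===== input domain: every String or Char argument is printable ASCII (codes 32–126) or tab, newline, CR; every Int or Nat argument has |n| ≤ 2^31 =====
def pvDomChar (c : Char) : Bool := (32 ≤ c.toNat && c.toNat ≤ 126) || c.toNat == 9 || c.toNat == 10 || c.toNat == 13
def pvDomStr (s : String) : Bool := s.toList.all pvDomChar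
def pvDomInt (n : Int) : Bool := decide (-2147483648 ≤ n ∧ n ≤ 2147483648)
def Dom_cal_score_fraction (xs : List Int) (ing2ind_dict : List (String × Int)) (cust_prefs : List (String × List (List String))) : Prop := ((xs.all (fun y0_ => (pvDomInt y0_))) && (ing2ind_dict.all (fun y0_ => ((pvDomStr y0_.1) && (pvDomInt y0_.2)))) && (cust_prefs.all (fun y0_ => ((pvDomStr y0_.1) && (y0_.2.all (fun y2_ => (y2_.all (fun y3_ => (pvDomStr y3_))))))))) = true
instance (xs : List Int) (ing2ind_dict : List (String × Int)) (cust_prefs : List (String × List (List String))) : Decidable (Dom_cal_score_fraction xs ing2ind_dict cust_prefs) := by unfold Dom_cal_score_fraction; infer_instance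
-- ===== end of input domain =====

-- B aggregates net per-ingredient counts into a dictionary and returns one weighted sum, instead of A's two comprehension scans; alternative algorithm, same cost.


-- ===== PORT A =====
-- Two comprehensions building like_scores and dislike_scores, then sum(like) - sum(dislike).
def cal_score_fraction (xs : List Int) (ing2ind_dict : List (String × Int)) (cust_prefs : List (String × List (List String))) : Int :=
  let d := PySem.Dict.ofList ing2ind_dict
  let cp := PySem.Dict.ofList cust_prefs
  let like_scores :=
    cp.values.flatMap (fun prefs =>
      ((PySem.List.pyGetD prefs 1 []).filter (fun like => d.contains like)).map
        (fun like => PySem.List.pyGetD xs (d.getD like 0) 0))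
  let dislike_scores :=
    cp.values.flatMap (fun prefs =>
      ((PySem.List.pyGetD prefs 0 []).filter (fun dislike => d.contains dislike)).map
        (fun dislike => PySem.List.pyGetD xs (d.getD dislike 0) 0))
  like_scores.sum - dislike_scores.sum

-- ===== PORT B =====
-- Phase 1: a net-count dictionary (+1 per like, -1 per dislike); phase 2: one weighted sum over its items.
def cal_score_fraction_alt (xs : List Int) (ing2ind_dict : List (String × Int)) (cust_prefs : List (String × List (List String))) : Int :=
  let d := PySem.Dict.ofList ing2ind_dict
  let net : PySem.Dict String Int :=
    (PySem.Dict.ofList cust_prefs).values.foldl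
      (fun net prefs =>
        let net := (PySem.List.pyGetD prefs 0 []).foldl
          (fun n k => n.insert k (n.getD k 0 - 1)) net
        (PySem.List.pyGetD prefs 1 []).foldl
          (fun n k => n.insert k (n.getD k 0 + 1)) net)
      PySem.Dict.empty
  ((net.items.filter (fun p => d.contains p.1)).map
      (fun p => p.2 * PySem.List.pyGetD xs (d.getD p.1 0) 0)).sum

-- ===== PRECONDITION & SPEC =====
-- Pre_ excludes exactly the inputs where the Python A raises: a customer's prefs list with
-- fewer than 2 entries (IndexError on prefs[1]/prefs[0]) or a matched ingredient whose
-- dictionary index is outside Python's range for xs (IndexError on xs[...]).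
def Pre_cal_score_fraction (xs : List Int) (ing2ind_dict : List (String × Int)) (cust_prefs : List (String × List (List String))) : Prop :=
  ∀ prefs ∈ (PySem.Dict.ofList cust_prefs).values,
    2 ≤ prefs.length ∧
    ∀ s ∈ (PySem.List.pyGetD prefs 0 [] ++ PySem.List.pyGetD prefs 1 []),
      (PySem.Dict.ofList ing2ind_dict).contains s = true →
        PySem.Raise.InRange xs.length ((PySem.Dict.ofList ing2ind_dict).getD s 0)
instance (xs : List Int) (ing2ind_dict : List (String × Int)) (cust_prefs : List (String × List (List String))) : Decidable (Pre_cal_score_fraction xs ing2ind_dict cust_prefs) := by unfold Pre_cal_score_fraction; infer_instance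

def pvWitness_cal_score_fraction : List Int × (List (String × Int)) × (List (String × List (List String))) :=
  ([3, 5], [("a", 0), ("b", 1)], [("c", [["b"], ["a", "z"]])])

def Spec_cal_score_fraction (xs : List Int) (ing2ind_dict : List (String × Int)) (cust_prefs : List (String × List (List String))) (out : Int) : Prop := out = cal_score_fraction_alt xs ing2ind_dict cust_prefs
instance (xs : List Int) (ing2ind_dict : List (String × Int)) (cust_prefs : List (String × List (List String))) (out : Int) : Decidable (Spec_cal_score_fraction xs ing2ind_dict cust_prefs out) := by unfold Spec_cal_score_fraction; infer_instance

-- ===== CLAIM (what is proved, stated in full; the proofs are below) =====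
def Claim_equal_cal_score_fraction : Prop := ∀ (xs : List Int) (ing2ind_dict : List (String × Int)) (cust_prefs : List (String × List (List String))), Dom_cal_score_fraction xs ing2ind_dict cust_prefs → Pre_cal_score_fraction xs ing2ind_dict cust_prefs → Spec_cal_score_fraction xs ing2ind_dict cust_prefs (cal_score_fraction xs ing2ind_dict cust_prefs)

-- ===== LEMMAS AND PROOFS =====

-- weighted item sum of a dict under a per-key weight g
def pvW (g : String → Int) (net : PySem.Dict String Int) : Int :=
  (net.items.map (fun p => p.2 * g p.1)).sum

-- replacing the (unique) entry at key k by (k, v) in an association list with nodup keys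
theorem pv_sum_map_update (g : String → Int) (l : List (String × Int)) (k : String) (c v : Int)
    (hnd : (l.map Prod.fst).Nodup) (hc : (k, c) ∈ l) :
    ((l.map (fun p => if p.1 == k then (k, v) else p)).map (fun p => p.2 * g p.1)).sum
      = (l.map (fun p => p.2 * g p.1)).sum - c * g k + v * g k := by
  induction l with
  | nil => cases hc
  | cons p l ih =>
    simp only [List.map_cons, List.nodup_cons, List.mem_map] at hnd
    by_cases hpk : p.1 = k
    · have hpc : p = (k, c) := by
        rcases List.mem_cons.mp hc with h | h
        · exact h.symm
        · exact absurd ⟨(k, c), h, by simp [hpk]⟩ hnd.1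
      have hnotail : ∀ q ∈ l, (if q.1 == k then ((k, v) : String × Int) else q) = q := by
        intro q hq
        have : q.1 ≠ k := by
          intro h; exact hnd.1 ⟨q, hq, by simp [h, hpk]⟩
        simp [this]
      simp only [List.map_cons, beq_self_eq_true, if_true, List.sum_cons,
        List.map_congr_left hnotail, hpc]
      simp
      ring
    · have hc' : (k, c) ∈ l := by
        rcases List.mem_cons.mp hc with h | h
        · exact absurd (by rw [← h]) hpk
        · exact h
      have hif : (if (p.1 == k) = true then ((k, v) : String × Int) else p) = p := by
        simp [hpk]
      simp only [List.map_cons, List.sum_cons, hif, ih hnd.2 hc']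
      ring

-- one "net[k] = net.get(k,0) + δ" step shifts the weighted sum by δ * g k
theorem pvW_insert_add (g : String → Int) (net : PySem.Dict String Int) (k : String) (δ : Int)
    (hnd : net.keys.Nodup) :
    pvW g (net.insert k (net.getD k 0 + δ)) = pvW g net + δ * g k := by
  unfold pvW
  by_cases hk : net.contains k = true
  · have hv' : (net.get? k).isSome := by
      rw [← PySem.Dict.contains_eq_isSome_get? net k]; exact hk
    obtain ⟨v, hv⟩ := Option.isSome_iff_exists.mp hv'
    have hmem : (k, v) ∈ net.items := PySem.Dict.mem_items_of_get?_eq_some net hv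
    have hgetD : net.getD k 0 = v := PySem.Dict.getD_of_get?_eq_some net 0 hv
    rw [PySem.Dict.items_insert_of_contains net (net.getD k 0 + δ) hk,
      pv_sum_map_update g net.items k v (net.getD k 0 + δ) hnd hmem, hgetD]
    ring
  · have hk' : net.contains k = false := by simpa using hk
    rw [PySem.Dict.items_insert_of_not_contains net (net.getD k 0 + δ) hk',
      PySem.Dict.getD_of_not_contains net 0 hk']
    simp

-- a whole foldl of such steps over a key list, fixed δ
theorem pvW_foldl (g : String → Int) (δ : Int) (ks : List String) (net : PySem.Dict String Int)
    (hnd : net.keys.Nodup) :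
    pvW g (ks.foldl (fun n k => n.insert k (n.getD k 0 + δ)) net)
      = pvW g net + δ * (ks.map g).sum := by
  induction ks generalizing net with
  | nil => simp
  | cons k ks ih =>
    simp only [List.foldl_cons, List.map_cons, List.sum_cons]
    rw [ih _ (PySem.Dict.nodup_keys_insert net k _ hnd),
      pvW_insert_add g net k δ hnd]
    ring

theorem pv_sub_eq_add_neg :
    (fun (n : PySem.Dict String Int) (k : String) => n.insert k (n.getD k 0 - 1))
      = fun n k => n.insert k (n.getD k 0 + (-1)) := by
  funext n k; rw [sub_eq_add_neg]

-- nodup keys are preserved through the per-customer step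
theorem pv_nodup_step (net : PySem.Dict String Int) (prefs : List (List String))
    (hnd : net.keys.Nodup) :
    ((PySem.List.pyGetD prefs 1 []).foldl (fun n k => n.insert k (n.getD k 0 + 1))
      ((PySem.List.pyGetD prefs 0 []).foldl (fun n k => n.insert k (n.getD k 0 - 1)) net)).keys.Nodup := by
  exact PySem.Dict.nodup_keys_foldl_insert _ _ _
    (PySem.Dict.nodup_keys_foldl_insert _ _ _ hnd)

-- the whole customer fold: weighted sum = likes-sum minus dislikes-sum
theorem pvW_customers (g : String → Int) (vs : List (List (List String)))
    (net : PySem.Dict String Int) (hnd : net.keys.Nodup) :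
    pvW g (vs.foldl
      (fun net prefs =>
        let net := (PySem.List.pyGetD prefs 0 []).foldl
          (fun n k => n.insert k (n.getD k 0 - 1)) net
        (PySem.List.pyGetD prefs 1 []).foldl
          (fun n k => n.insert k (n.getD k 0 + 1)) net) net)
      = pvW g net
        + (vs.map (fun prefs => ((PySem.List.pyGetD prefs 1 []).map g).sum)).sum
        - (vs.map (fun prefs => ((PySem.List.pyGetD prefs 0 []).map g).sum)).sum := by
  induction vs generalizing net with
  | nil => simp
  | cons v vs ih =>
    simp only [List.foldl_cons, List.map_cons, List.sum_cons]
    rw [ih _ (pv_nodup_step net v hnd)]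
    have h1 : pvW g ((PySem.List.pyGetD v 1 []).foldl (fun n k => n.insert k (n.getD k 0 + 1))
        ((PySem.List.pyGetD v 0 []).foldl (fun n k => n.insert k (n.getD k 0 - 1)) net))
        = pvW g net + (-1) * ((PySem.List.pyGetD v 0 []).map g).sum
            + 1 * ((PySem.List.pyGetD v 1 []).map g).sum := by
      rw [pvW_foldl g 1 _ _ (by rw [pv_sub_eq_add_neg]; exact PySem.Dict.nodup_keys_foldl_insert _ _ _ hnd)]
      rw [pv_sub_eq_add_neg, pvW_foldl g (-1) _ _ hnd]
    rw [h1]; ring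

-- a filtered-then-mapped sum is the unfiltered sum of the if-guarded map
theorem pv_sum_filter_map {α : Type} (p : α → Bool) (f : α → Int) (l : List α) :
    ((l.filter p).map f).sum = (l.map (fun x => if p x then f x else 0)).sum := by
  induction l with
  | nil => rfl
  | cons x l ih =>
    by_cases h : p x = true
    · simp [h, ih]
    · simp [h, ih]

-- a flatMap's sum is the sum of the per-element sums (via List.sum_flatten)
theorem pv_sum_flatMap {α : Type} (l : List α) (f : α → List Int) :
    (l.flatMap f).sum = (l.map (fun x => (f x).sum)).sum := by
  rw [List.flatMap_def, List.sum_flatten, List.map_map]; rfl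

-- ===== VERDICT (by name: the statement is the Claim_ definition above) =====
theorem cal_score_fraction_spec : Claim_equal_cal_score_fraction := by
  intro xs ing cust _ _
  unfold Spec_cal_score_fraction cal_score_fraction cal_score_fraction_alt
  set d := PySem.Dict.ofList ing with hd
  set g : String → Int :=
    fun k => if d.contains k then PySem.List.pyGetD xs (d.getD k 0) 0 else 0 with hg
  have hgw : (fun (p : String × Int) => if d.contains p.1 then p.2 * PySem.List.pyGetD xs (d.getD p.1 0) 0 else 0)
      = fun p => p.2 * g p.1 := by
    funext p; rw [hg]; by_cases h : d.contains p.1 = true <;> simp [h]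
  have hfil : ∀ l : List String,
      ((l.filter (fun s => d.contains s)).map (fun s => PySem.List.pyGetD xs (d.getD s 0) 0)).sum
        = (l.map g).sum := by
    intro l
    rw [pv_sum_filter_map (fun s => d.contains s) (fun s => PySem.List.pyGetD xs (d.getD s 0) 0) l]
  have hB : ((((PySem.Dict.ofList cust).values.foldl
      (fun net prefs =>
        let net := (PySem.List.pyGetD prefs 0 []).foldl
          (fun (n : PySem.Dict String Int) k => n.insert k (n.getD k 0 - 1)) net
        (PySem.List.pyGetD prefs 1 []).foldl
          (fun n k => n.insert k (n.getD k 0 + 1)) net)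
      PySem.Dict.empty).items.filter (fun p => d.contains p.1)).map
        (fun p => p.2 * PySem.List.pyGetD xs (d.getD p.1 0) 0)).sum
      = ((PySem.Dict.ofList cust).values.map (fun prefs => ((PySem.List.pyGetD prefs 1 []).map g).sum)).sum
        - ((PySem.Dict.ofList cust).values.map (fun prefs => ((PySem.List.pyGetD prefs 0 []).map g).sum)).sum := by
    rw [pv_sum_filter_map (fun (p : String × Int) => d.contains p.1)
      (fun (p : String × Int) => p.2 * PySem.List.pyGetD xs (d.getD p.1 0) 0) _, hgw]
    have hW : ((((PySem.Dict.ofList cust).values.foldl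
        (fun net prefs =>
          let net := (PySem.List.pyGetD prefs 0 []).foldl
            (fun (n : PySem.Dict String Int) k => n.insert k (n.getD k 0 - 1)) net
          (PySem.List.pyGetD prefs 1 []).foldl
            (fun n k => n.insert k (n.getD k 0 + 1)) net)
        PySem.Dict.empty).items).map (fun p => p.2 * g p.1)).sum
        = pvW g ((PySem.Dict.ofList cust).values.foldl
          (fun net prefs =>
            let net := (PySem.List.pyGetD prefs 0 []).foldl
              (fun (n : PySem.Dict String Int) k => n.insert k (n.getD k 0 - 1)) net
            (PySem.List.pyGetD prefs 1 []).foldl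
              (fun n k => n.insert k (n.getD k 0 + 1)) net)
          PySem.Dict.empty) := rfl
    rw [hW, pvW_customers g _ PySem.Dict.empty PySem.Dict.nodup_keys_empty]
    have hempty : pvW g PySem.Dict.empty = 0 := rfl
    rw [hempty]; ring
  rw [hB]
  simp only [pv_sum_flatMap, hfil]
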